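-- pv_equiv track=rewrite | github.com/IcarusLIM/AppSpider | proxy/utils.py | json_split
-- ===== SOURCE A (Python) =====
-- import math
--
-- def json_split(s):
--     index_arr = []
--     counter = 0
--     skip = False
--     in_quote = False
--     for i in range(len(s)):
--         if skip:
--             skip = False
--             continue
--         c = s[i]
--         if c == '"':
--             in_quote = not in_quote
--             continue
--         if in_quote:
--             if c == "\\":
--                 skip = True
--         else:
--             if c == "{":
--                 counter += 1
--                 if counter == 1:
--                     index_arr.append(i)
--             elif c == "}":
--                 counter -= 1
--                 if counter == 0:
--                     index_arr.append(i)
--     json_strs = []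
--     for i in range(math.floor(len(index_arr) / 2)):
--         json_strs.append(s[index_arr[i * 2] : index_arr[i * 2 + 1] + 1])
--     return json_strs
-- ===== SOURCE B (Python) =====
-- def json_split(s):
--     json_strs = []
--     cur = None  # accumulated characters of the current top-level object, or None
--     depth = 0
--     in_quote = False
--     skip = False
--     for c in s:
--         if skip:
--             skip = False
--             if cur is not None:
--                 cur.append(c)
--             continue
--         if c == '"':
--             in_quote = not in_quote
--         elif in_quote:
--             if c == "\\":
--                 skip = True
--         elif c == "{":
--             depth += 1
--             if depth == 1:
--                 cur = []
--         elif c == "}":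
--             depth -= 1
--             if depth == 0 and cur is not None:
--                 cur.append(c)
--                 json_strs.append("".join(cur))
--                 cur = None
--                 continue
--         if cur is not None:
--             cur.append(c)
--     return json_strs
-- ===== Notes on version B (the rewrite author's own statement) =====
-- stated objective: simpler
-- what changed: B replaces A's two-pass scheme (collect all top-level brace boundary indices into a flat list, then a second math.floor-driven loop pairing them up and slicing) with a single pass that accumulates the characters of the current top-level object in a buffer and emits it when the depth returns to 0, eliminating the index array, the pairing loop and the math import.
import Mathlib
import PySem

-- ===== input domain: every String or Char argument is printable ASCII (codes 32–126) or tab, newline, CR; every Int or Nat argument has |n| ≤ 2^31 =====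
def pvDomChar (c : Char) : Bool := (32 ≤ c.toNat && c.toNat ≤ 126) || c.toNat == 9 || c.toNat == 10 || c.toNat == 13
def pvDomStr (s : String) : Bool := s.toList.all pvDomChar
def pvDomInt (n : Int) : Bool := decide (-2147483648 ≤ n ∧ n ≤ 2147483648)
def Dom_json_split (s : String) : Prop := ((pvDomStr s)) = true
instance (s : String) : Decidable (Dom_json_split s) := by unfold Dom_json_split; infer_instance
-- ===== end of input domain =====

-- B replaces A's two-pass scheme (collect all boundary indices, then pair them up and slice)
-- by a one-pass scan that accumulates the characters of the current top-level object directly;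
-- objective: simpler (no index array, no pairing loop, no math.floor).

-- ===== PORT A =====
-- one step of A's scanning loop: state = (index_arr, counter, skip, in_quote)
def jsonSplitStepA (st : List Int × Int × Bool × Bool) (p : Int × Char) :
    List Int × Int × Bool × Bool :=
  match st with
  | (arr, counter, skip, inq) =>
    if skip then (arr, counter, false, inq)
    else if p.2 = '"' then (arr, counter, skip, !inq)
    else if inq then (if p.2 = '\\' then (arr, counter, true, inq) else (arr, counter, skip, inq))
    else if p.2 = '{' then (if counter + 1 = 1 then arr ++ [p.1] else arr, counter + 1, skip, inq)
    else if p.2 = '}' then (if counter - 1 = 0 then arr ++ [p.1] else arr, counter - 1, skip, inq)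
    else (arr, counter, skip, inq)

-- body of A's second loop: json_strs.append(s[index_arr[i*2] : index_arr[i*2+1] + 1])
def jsonSplitPairAt (s : String) (arr : List Int) (i : Int) : String :=
  PySem.Str.slice s (some (PySem.List.pyGetD arr (i * 2) 0))
    (some (PySem.List.pyGetD arr (i * 2 + 1) 0 + 1))

-- math.floor(len(index_arr) / 2) = len(index_arr) // 2 (the length is a nonnegative int)
def json_split (s : String) : List String :=
  let fin := (PySem.List.enumerate s.toList).foldl jsonSplitStepA ([], 0, false, false)
  let index_arr := fin.1
  (PySem.List.pyRange 0 (PySem.Int.floordiv (index_arr.length : Int) 2) 1).foldl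
    (fun json_strs i => json_strs ++ [jsonSplitPairAt s index_arr i]) []

-- ===== PORT B =====
-- cur.append(c) when cur is not None (Python's trailing 'if cur is not None: cur.append(c)')
def jsonSplitPush (cur : Option (List Char)) (c : Char) : Option (List Char) :=
  cur.map (fun buf => buf ++ [c])

-- one step of B's single loop: state = (json_strs, cur, depth, in_quote, skip)
def jsonSplitStepB (st : List String × Option (List Char) × Int × Bool × Bool) (c : Char) :
    List String × Option (List Char) × Int × Bool × Bool :=
  match st with
  | (res, cur, depth, inq, skip) =>
    if skip then (res, jsonSplitPush cur c, depth, inq, false)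
    else if c = '"' then (res, jsonSplitPush cur c, depth, !inq, skip)
    else if inq then
      (if c = '\\' then (res, jsonSplitPush cur c, depth, inq, true)
       else (res, jsonSplitPush cur c, depth, inq, skip))
    else if c = '{' then
      (res, jsonSplitPush (if depth + 1 = 1 then some [] else cur) c, depth + 1, inq, skip)
    else if c = '}' then
      (if depth - 1 = 0 then
        (match cur with
         -- ''.join of a list of single characters is String.ofList
         | some buf => (res ++ [String.ofList (buf ++ [c])], none, depth - 1, inq, skip)
         | none => (res, none, depth - 1, inq, skip))
       else (res, jsonSplitPush cur c, depth - 1, inq, skip))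
    else (res, jsonSplitPush cur c, depth, inq, skip)

def json_split_alt (s : String) : List String :=
  (s.toList.foldl jsonSplitStepB ([], none, 0, false, false)).1

-- ===== PRECONDITION & SPEC =====
def Spec_json_split (s : String) (out : List String) : Prop := out = json_split_alt s
instance (s : String) (out : List String) : Decidable (Spec_json_split s out) := by unfold Spec_json_split; infer_instance

-- ===== CLAIM (what is proved, stated in full; the proofs are below) =====
def Claim_equal_json_split : Prop := ∀ (s : String), Dom_json_split s → Spec_json_split s (json_split s)

-- ===== LEMMAS AND PROOFS =====

-- A's second loop, in map form (proof-side view of the pairing pass)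
def jsonSplitPairs (s : String) (arr : List Int) : List String :=
  (PySem.List.pyRange 0 (PySem.Int.floordiv (arr.length : Int) 2) 1).map (jsonSplitPairAt s arr)

lemma fd2 (m : Nat) : PySem.Int.floordiv (m : Int) 2 = ((m / 2 : Nat) : Int) := by
  exact_mod_cast PySem.Int.floordiv_natCast m 2

-- pairAt only looks at indices < 2*k, so a suffix of the array is irrelevant
lemma pairAt_prefix (s : String) (arr0 ext : List Int) (k : Nat) (h : 2 * k ≤ arr0.length) :
    (PySem.List.pyRange 0 (k : Int) 1).map (jsonSplitPairAt s (arr0 ++ ext))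
      = (PySem.List.pyRange 0 (k : Int) 1).map (jsonSplitPairAt s arr0) := by
  apply List.map_congr_left
  intro i hi
  rw [PySem.List.mem_pyRange_one] at hi
  obtain ⟨j, rfl⟩ : ∃ j : Nat, i = (j : Int) := ⟨i.toNat, (Int.toNat_of_nonneg hi.1).symm⟩
  have hj : j < k := by exact_mod_cast hi.2
  unfold jsonSplitPairAt
  have h1 : (j : Int) * 2 = ((j * 2 : Nat) : Int) := by push_cast; ring
  have h2 : (j : Int) * 2 + 1 = ((j * 2 + 1 : Nat) : Int) := by push_cast; ring
  rw [h2, h1, PySem.List.pyGetD_natCast, PySem.List.pyGetD_natCast,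
      PySem.List.pyGetD_natCast, PySem.List.pyGetD_natCast,
      List.getD_append _ _ _ _ (by omega), List.getD_append _ _ _ _ (by omega)]

-- a trailing unmatched opening index is dropped by the floor pairing
lemma pairs_snoc_even (s : String) (arr0 : List Int) (a : Int) (h : Even arr0.length) :
    jsonSplitPairs s (arr0 ++ [a]) = jsonSplitPairs s arr0 := by
  obtain ⟨k, hk⟩ := h
  unfold jsonSplitPairs
  have hl : (arr0 ++ [a]).length = 2 * k + 1 := by simp [hk]; omega
  have hl0 : arr0.length = 2 * k := by omega
  rw [hl, hl0, fd2, fd2]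
  have e1 : (2 * k + 1) / 2 = k := by omega
  have e2 : 2 * k / 2 = k := by omega
  rw [e1, e2, pairAt_prefix s arr0 [a] k (by omega)]

-- closing a top-level object appends exactly one more slice
lemma pairs_snoc_pair (s : String) (arr0 : List Int) (a b : Nat) (h : Even arr0.length) :
    jsonSplitPairs s (arr0 ++ [(a : Int), (b : Int)])
      = jsonSplitPairs s arr0
        ++ [PySem.Str.slice s (some (a : Int)) (some ((b : Int) + 1))] := by
  obtain ⟨k, hk⟩ := h
  have hl0 : arr0.length = 2 * k := by omega
  unfold jsonSplitPairs
  have hl : (arr0 ++ [(a : Int), (b : Int)]).length = 2 * k + 2 := by simp [hl0]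
  rw [hl, hl0, fd2, fd2]
  have e1 : (2 * k + 2) / 2 = k + 1 := by omega
  have e2 : 2 * k / 2 = k := by omega
  rw [e1, e2]
  have hr : PySem.List.pyRange 0 ((k + 1 : Nat) : Int) 1
      = PySem.List.pyRange 0 (k : Int) 1 ++ [(k : Int)] := by
    have : ((k + 1 : Nat) : Int) = (k : Int) + 1 := by push_cast; ring
    rw [this, PySem.List.pyRange_one_succ_right (by positivity)]
  rw [hr, List.map_append, pairAt_prefix s arr0 [(a : Int), (b : Int)] k (by omega)]
  congr 1
  simp only [List.map_cons, List.map_nil]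
  unfold jsonSplitPairAt
  have h1 : (k : Int) * 2 = ((2 * k : Nat) : Int) := by push_cast; ring
  have h2 : (k : Int) * 2 + 1 = ((2 * k + 1 : Nat) : Int) := by push_cast; ring
  rw [h2, h1, PySem.List.pyGetD_natCast, PySem.List.pyGetD_natCast]
  have g1 : (arr0 ++ [(a : Int), (b : Int)]).getD (2 * k) 0 = (a : Int) := by
    simp [List.getD_eq_getElem?_getD, hl0]
  have g2 : (arr0 ++ [(a : Int), (b : Int)]).getD (2 * k + 1) 0 = (b : Int) := by
    simp [List.getD_eq_getElem?_getD, hl0]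
  rw [g1, g2]

-- the Python slice s[a : b+1] as the character buffer B accumulates
lemma slice_eq_ofList (s : String) (a b : Nat) :
    PySem.Str.slice s (some (a : Int)) (some ((b : Int) + 1))
      = String.ofList ((s.toList.drop a).take (b + 1 - a)) := by
  apply String.toList_inj.mp
  rw [PySem.Str.toList_slice, String.toList_ofList]
  have : ((b : Int) + 1) = ((b + 1 : Nat) : Int) := by push_cast; ring
  rw [this, PySem.Chars.slice_eq_listSlice, PySem.List.slice_natCast]

lemma buf_extend (s : String) (a n : Nat) (c : Char) (h : a ≤ n)
    (hc : s.toList[n]? = some c) :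
    (s.toList.drop a).take (n - a) ++ [c] = (s.toList.drop a).take (n + 1 - a) := by
  have e : n + 1 - a = (n - a) + 1 := by omega
  rw [e, List.take_add_one]
  have : (s.toList.drop a)[n - a]? = some c := by
    rw [List.getElem?_drop, Nat.add_sub_cancel' h]; exact hc
  rw [this]
  rfl

-- the loop invariant tying A's state (index_arr, counter) to B's (json_strs, cur)
def JsonSplitInv (s : String) (n : Nat) (arr : List Int) (cnt : Int)
    (res : List String) (cur : Option (List Char)) : Prop :=
  match cur with
  | none => Even arr.length ∧ jsonSplitPairs s arr = res ∧ cnt ≤ 0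
  | some buf => 1 ≤ cnt ∧ ∃ (arr0 : List Int) (a : Nat), arr = arr0 ++ [(a : Int)]
      ∧ Even arr0.length ∧ jsonSplitPairs s arr0 = res ∧ a ≤ n
      ∧ buf = (s.toList.drop a).take (n - a)

-- every plain step pushes c onto cur (when active) and keeps the invariant
lemma inv_push (s : String) (n : Nat) (arr : List Int) (cnt : Int)
    (res : List String) (cur : Option (List Char)) (c : Char)
    (hc : s.toList[n]? = some c) (h : JsonSplitInv s n arr cnt res cur) :
    JsonSplitInv s (n + 1) arr cnt res (jsonSplitPush cur c) := by
  cases cur with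
  | none => exact h
  | some buf =>
    obtain ⟨h1, arr0, a, rfl, he, hp, ha, hb⟩ := h
    refine ⟨h1, arr0, a, rfl, he, hp, by omega, ?_⟩
    rw [hb]
    exact (buf_extend s a n c ha hc).symm ▸ rfl

lemma json_split_main (s : String) (cs : List Char) : ∀ (n : Nat) (arr : List Int)
    (cnt : Int) (q sk : Bool) (res : List String) (cur : Option (List Char)),
    s.toList.drop n = cs → JsonSplitInv s n arr cnt res cur →
    jsonSplitPairs s (((PySem.List.enumerate cs (n : Int)).foldl jsonSplitStepA
        (arr, cnt, sk, q)).1)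
      = (cs.foldl jsonSplitStepB (res, cur, cnt, q, sk)).1 := by
  induction cs with
  | nil =>
    intro n arr cnt q sk res cur _ hinv
    simp only [PySem.List.enumerate, List.foldl_nil]
    cases cur with
    | none => exact hinv.2.1
    | some buf =>
      obtain ⟨_, arr0, a, rfl, he, hp, _, _⟩ := hinv
      rw [pairs_snoc_even s arr0 _ he]; exact hp
  | cons c cs ih =>
    intro n arr cnt q sk res cur hdrop hinv
    have hc : s.toList[n]? = some c := by
      have := List.getElem?_drop (xs := s.toList) (i := n) (j := 0)
      rw [hdrop] at this; simpa using this.symm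
    have hdrop' : s.toList.drop (n + 1) = cs := by
      rw [List.drop_add_one_eq_tail_drop, hdrop]; rfl
    have hcast : (n : Int) + 1 = ((n + 1 : Nat) : Int) := by push_cast; ring
    rw [PySem.List.enumerate_cons, List.foldl_cons, List.foldl_cons, hcast]
    simp only [jsonSplitStepA, jsonSplitStepB]
    by_cases hsk : sk
    · simp only [hsk, if_pos]
      exact ih (n + 1) _ _ _ _ _ _ hdrop' (inv_push s n arr cnt res cur c hc hinv)
    · simp only [hsk, if_false, Bool.false_eq_true]
      by_cases hq' : c = '"'
      · simp only [hq', if_pos]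
        exact ih (n + 1) _ _ _ _ _ _ hdrop' (inv_push s n arr cnt res cur '"' (hq' ▸ hc) hinv)
      · simp only [hq', if_false]
        by_cases hin : q
        · simp only [hin, if_true]
          by_cases hbs : c = '\\'
          · simp only [hbs, if_pos]
            exact ih (n + 1) _ _ _ _ _ _ hdrop' (inv_push s n arr cnt res cur _ (hbs ▸ hc) hinv)
          · simp only [hbs, if_false]
            exact ih (n + 1) _ _ _ _ _ _ hdrop' (inv_push s n arr cnt res cur c hc hinv)
        · simp only [hin, Bool.false_eq_true, if_false]
          by_cases hob : c = '{'
          · simp only [hob, if_pos]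
            by_cases h1 : cnt + 1 = 1
            · simp only [h1, if_pos]
              -- top-level open: cur must be none (else 1 ≤ cnt contradicts cnt + 1 = 1)
              cases cur with
              | some buf => exact absurd h1 (by have := hinv.1; omega)
              | none =>
                obtain ⟨he, hp, _⟩ := hinv
                apply ih (n + 1) _ _ _ _ _ _ hdrop'
                refine ⟨by omega, arr, n, rfl, he, hp, by omega, ?_⟩
                simp only [List.nil_append]
                rw [hdrop]
                simp [hob]
            · simp only [h1, if_false]
              apply ih (n + 1) _ _ _ _ _ _ hdrop'
              cases cur with
              | none =>
                obtain ⟨he, hp, hle⟩ := hinv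
                exact ⟨he, hp, by omega⟩
              | some buf =>
                obtain ⟨hge, arr0, a, rfl, he, hp, ha, hb⟩ := hinv
                refine ⟨by omega, arr0, a, rfl, he, hp, by omega, ?_⟩
                rw [hb]
                exact ((buf_extend s a n '{' ha (hob ▸ hc)).symm ▸ rfl)
          · simp only [hob, if_false]
            by_cases hcb : c = '}'
            · simp only [hcb, if_pos]
              by_cases h0 : cnt - 1 = 0
              · simp only [h0, if_pos]
                -- top-level close: cur must be some (else cnt ≤ 0 contradicts cnt - 1 = 0)
                cases cur with
                | none => exact absurd h0 (by have := hinv.2.2; omega)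
                | some buf =>
                  obtain ⟨hge, arr0, a, rfl, he, hp, ha, hb⟩ := hinv
                  apply ih (n + 1) _ _ _ _ _ _ hdrop'
                  refine ⟨by simp only [List.length_append, List.length_cons, List.length_nil, Nat.even_iff] at he ⊢; omega, ?_, by omega⟩
                  rw [List.append_assoc]
                  show jsonSplitPairs s (arr0 ++ [(a : Int), ((n : Nat) : Int)]) = _
                  rw [pairs_snoc_pair s arr0 a n he, hp, slice_eq_ofList s a n]
                  congr 2
                  rw [hb, buf_extend s a n '}' ha (hcb ▸ hc)]
              · simp only [h0, if_false]
                apply ih (n + 1) _ _ _ _ _ _ hdrop'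
                cases cur with
                | none =>
                  obtain ⟨he, hp, hle⟩ := hinv
                  exact ⟨he, hp, by omega⟩
                | some buf =>
                  obtain ⟨hge, arr0, a, rfl, he, hp, ha, hb⟩ := hinv
                  refine ⟨by omega, arr0, a, rfl, he, hp, by omega, ?_⟩
                  rw [hb]
                  exact ((buf_extend s a n '}' ha (hcb ▸ hc)).symm ▸ rfl)
            · simp only [hcb, if_false]
              exact ih (n + 1) _ _ _ _ _ _ hdrop' (inv_push s n arr cnt res cur c hc hinv)

-- ===== VERDICT (by name: the statement is the Claim_ definition above) =====
theorem json_split_spec : Claim_equal_json_split := by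
  intro s _
  unfold Spec_json_split
  show json_split s = json_split_alt s
  unfold json_split json_split_alt
  simp only []
  rw [PySem.List.foldl_append_singleton_eq_map]
  have h := json_split_main s s.toList 0 [] 0 false false [] none (by simp)
    ⟨⟨0, rfl⟩, rfl, le_refl 0⟩
  simpa [jsonSplitPairs] using h
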